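-- pv_equiv track=rewrite | github.com/Reed-Quest/crossword | solver.py | get_word_lowest_connection_count
-- ===== SOURCE A (Python) =====
-- def find_shared_letter(word1,word2):
--     shared_ls = []
--     for letter in word1:
--         if letter in word2:
--             shared_ls.append(letter)
--     return shared_ls
--
-- def count_shared_letters(word1,word2):
--     shared_ls = find_shared_letter(word1,word2)
--     return len(shared_ls)
--
-- def count_possible_connections(word,words_ls):
--     possible_connections_count = 0
--     for x in words_ls:
--         if x != word:
--             possible_connections_count += count_shared_letters(word,x)
--     return possible_connections_count
--
-- def get_word_lowest_connection_count(candidates,words_ls):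
--     candidate_word = candidates[0]
--     candidate_count = count_possible_connections(candidate_word,words_ls)
--     for curr_word in candidates:
--         curr_count = count_possible_connections(curr_word,words_ls)
--         if curr_count < candidate_count:
--             candidate_word = curr_word
--             candidate_count = curr_count
--     return candidate_word
-- ===== SOURCE B (Python) =====
-- def get_word_lowest_connection_count(candidates, words_ls):
--     # Precompute: for each letter, how many words contain it; and word multiplicities.
--     word_count = {}
--     letter_count = {}
--     for w in words_ls:
--         word_count[w] = word_count.get(w, 0) + 1
--         for l in dict.fromkeys(w):
--             letter_count[l] = letter_count.get(l, 0) + 1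
--     def score(w):
--         return sum(letter_count.get(l, 0) for l in w) - word_count.get(w, 0) * len(w)
--     return min(candidates, key=score)
-- ===== Notes on version B (the rewrite author's own statement) =====
-- stated objective: faster
-- what changed: Instead of rescanning the whole word list (with an inner letter-membership scan) for every candidate, B makes one pass over words_ls building a per-letter word-containment table and a word-multiplicity table, then scores each candidate in O(L) as sum of its letters' table entries minus multiplicity*length, taking the first minimum via min(key=...).
import Mathlib
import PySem

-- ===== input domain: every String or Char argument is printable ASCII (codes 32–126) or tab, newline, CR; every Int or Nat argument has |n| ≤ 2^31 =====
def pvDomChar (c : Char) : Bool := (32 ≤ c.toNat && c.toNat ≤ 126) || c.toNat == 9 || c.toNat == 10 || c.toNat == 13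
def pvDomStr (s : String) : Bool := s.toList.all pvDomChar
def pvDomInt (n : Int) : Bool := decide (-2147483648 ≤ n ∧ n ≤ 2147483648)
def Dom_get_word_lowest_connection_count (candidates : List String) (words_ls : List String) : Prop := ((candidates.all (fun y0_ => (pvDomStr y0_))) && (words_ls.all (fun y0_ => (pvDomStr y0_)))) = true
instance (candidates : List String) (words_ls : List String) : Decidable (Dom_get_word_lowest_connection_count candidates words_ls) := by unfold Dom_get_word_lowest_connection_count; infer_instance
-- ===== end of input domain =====

-- B replaces A's per-candidate rescans of the whole word list by one precomputed
-- per-letter word-containment table plus a word-multiplicity table (objective: faster, asymptotic).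

-- ===== PORT A =====
def find_shared_letter (word1 word2 : String) : List Char :=
  word1.toList.foldl
    (fun shared_ls letter =>
      if word2.toList.contains letter then shared_ls ++ [letter] else shared_ls) []

def count_shared_letters (word1 word2 : String) : Int :=
  ((find_shared_letter word1 word2).length : Int)

def count_possible_connections (word : String) (words_ls : List String) : Int :=
  words_ls.foldl
    (fun acc x => if x ≠ word then acc + count_shared_letters word x else acc) 0

def get_word_lowest_connection_count (candidates : List String) (words_ls : List String) : String :=
  match candidates with
  | [] => ""   -- candidates[0] raises IndexError here; excluded by Pre_
  | c0 :: _ =>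
    (candidates.foldl
      (fun st curr =>
        let curr_count := count_possible_connections curr words_ls
        if curr_count < st.2 then (curr, curr_count) else st)
      (c0, count_possible_connections c0 words_ls)).1

-- ===== PORT B =====
-- the single pass over words_ls building word_count (fst) and letter_count (snd)
def pvBuildCounts (words_ls : List String) : PySem.Dict String Int × PySem.Dict Char Int :=
  words_ls.foldl
    (fun st w =>
      (st.1.insert w (st.1.getD w 0 + 1),
       (PySem.List.dedup w.toList).foldl (fun d l => d.insert l (d.getD l 0 + 1)) st.2))
    (PySem.Dict.empty, PySem.Dict.empty)

def pvScore (word_count : PySem.Dict String Int) (letter_count : PySem.Dict Char Int)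
    (w : String) : Int :=
  (w.toList.map (fun l => letter_count.getD l 0)).sum - word_count.getD w 0 * PySem.Str.len w

def get_word_lowest_connection_count_alt (candidates : List String) (words_ls : List String) : String :=
  (PySem.List.min? candidates
    (pvScore (pvBuildCounts words_ls).1 (pvBuildCounts words_ls).2)).getD ""  -- min raises on []; excluded by Pre_

-- ===== PRECONDITION & SPEC =====
-- Pre_ excludes only empty candidates, on which A raises IndexError (and B's min raises ValueError).
def Pre_get_word_lowest_connection_count (candidates : List String) (words_ls : List String) : Prop :=
  candidates ≠ []
instance (candidates : List String) (words_ls : List String) : Decidable (Pre_get_word_lowest_connection_count candidates words_ls) := by unfold Pre_get_word_lowest_connection_count; infer_instance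

def pvWitness_get_word_lowest_connection_count : List String × List String := (["ab", "cd"], ["ad", "cd"])

def Spec_get_word_lowest_connection_count (candidates : List String) (words_ls : List String) (out : String) : Prop := out = get_word_lowest_connection_count_alt candidates words_ls
instance (candidates : List String) (words_ls : List String) (out : String) : Decidable (Spec_get_word_lowest_connection_count candidates words_ls out) := by unfold Spec_get_word_lowest_connection_count; infer_instance

-- ===== CLAIM (what is proved, stated in full; the proofs are below) =====
def Claim_equal_get_word_lowest_connection_count : Prop := ∀ (candidates : List String) (words_ls : List String), Dom_get_word_lowest_connection_count candidates words_ls → Pre_get_word_lowest_connection_count candidates words_ls → Spec_get_word_lowest_connection_count candidates words_ls (get_word_lowest_connection_count candidates words_ls)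

-- ===== LEMMAS AND PROOFS =====

-- count_shared_letters is the number of letters of word1 lying in word2
theorem csl_eq_filter (w x : String) :
    count_shared_letters w x
      = (((w.toList.filter (fun c => x.toList.contains c)).length : Nat) : Int) := by
  unfold count_shared_letters find_shared_letter
  rw [PySem.List.foldl_append_if_eq_filter, List.nil_append]

-- indicator-sum form of the filter length
theorem sum_indicator (p : Char → Bool) (l : List Char) :
    (l.map (fun c => if p c then (1 : Int) else 0)).sum = ((l.filter p).length : Int) := by
  induction l with
  | nil => simp
  | cons c t ih =>
    by_cases h : p c <;> simp [h, ih] <;> push_cast <;> ring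

-- word_count characterisation
theorem buildCounts_fst (words_ls : List String) (st : PySem.Dict String Int × PySem.Dict Char Int)
    (w : String) :
    ((words_ls.foldl
      (fun st w =>
        (st.1.insert w (st.1.getD w 0 + 1),
         (PySem.List.dedup w.toList).foldl (fun d l => d.insert l (d.getD l 0 + 1)) st.2))
      st).1).getD w 0 = (st.1).getD w 0 + (words_ls.count w : Int) := by
  induction words_ls generalizing st with
  | nil => simp
  | cons x t ih =>
    rw [List.foldl_cons, ih, PySem.Dict.getD_insert]
    rcases eq_or_ne w x with h | h
    · simp [h, List.count_cons]; ring
    · simp [h, List.count_cons]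
      exact fun he => h he.symm

theorem count_dedup (c : Char) (xs : List Char) :
    (PySem.List.dedup xs).count c = if xs.contains c then 1 else 0 := by
  by_cases h : c ∈ xs
  · rw [List.count_eq_one_of_mem (PySem.List.nodup_dedup xs) ((PySem.List.mem_dedup xs c).2 h)]
    simp [h]
  · rw [List.count_eq_zero_of_not_mem (fun hm => h ((PySem.List.mem_dedup xs c).1 hm))]
    simp [h]

-- letter_count characterisation
theorem buildCounts_snd (words_ls : List String) (st : PySem.Dict String Int × PySem.Dict Char Int)
    (c : Char) :
    ((words_ls.foldl
      (fun st w =>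
        (st.1.insert w (st.1.getD w 0 + 1),
         (PySem.List.dedup w.toList).foldl (fun d l => d.insert l (d.getD l 0 + 1)) st.2))
      st).2).getD c 0
      = (st.2).getD c 0 + (words_ls.countP (fun x => x.toList.contains c) : Int) := by
  induction words_ls generalizing st with
  | nil => simp
  | cons x t ih =>
    rw [List.foldl_cons, ih]
    rw [PySem.Dict.getD_foldl_insert_add_one, count_dedup]
    rw [List.countP_cons]
    by_cases h : x.toList.contains c <;> simp [h] <;> push_cast <;> omega

-- shift-out the initial accumulator of count_possible_connections' loop
theorem cpc_cons (w x : String) (t : List String) :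
    count_possible_connections w (x :: t)
      = (if x ≠ w then count_shared_letters w x else 0) + count_possible_connections w t := by
  unfold count_possible_connections
  have shift : ∀ (l : List String) (a : Int),
      l.foldl (fun acc y => if y ≠ w then acc + count_shared_letters w y else acc) a
        = a + l.foldl (fun acc y => if y ≠ w then acc + count_shared_letters w y else acc) 0 := by
    intro l
    induction l with
    | nil => simp
    | cons y u ih =>
      intro a
      rw [List.foldl_cons, List.foldl_cons, ih, ih (if y ≠ w then 0 + count_shared_letters w y else 0)]
      split_ifs <;> ring
  rw [List.foldl_cons, shift]
  by_cases h : x = w <;> simp [h]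

-- sum over a list of a pointwise sum splits
theorem sum_map_add' (l : List Char) (f g : Char → Int) :
    (l.map (fun c => f c + g c)).sum = (l.map f).sum + (l.map g).sum := by
  induction l with
  | nil => simp
  | cons c t ih => simp only [List.map_cons, List.sum_cons, ih]; ring

-- closed form of A's connection count
theorem score_closed (w : String) (words_ls : List String) :
    count_possible_connections w words_ls
      = (w.toList.map (fun c => ((words_ls.countP (fun x => x.toList.contains c) : Nat) : Int))).sum
        - (words_ls.count w : Int) * (w.toList.length : Int) := by
  induction words_ls with
  | nil => simp [count_possible_connections]
  | cons x t ih =>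
    rw [cpc_cons, ih]
    have hsplit :
        (w.toList.map (fun c => (((x :: t).countP (fun y => y.toList.contains c) : Nat) : Int))).sum
          = (w.toList.map (fun c => ((t.countP (fun y => y.toList.contains c) : Nat) : Int))).sum
            + ((w.toList.filter (fun c => x.toList.contains c)).length : Int) := by
      rw [← sum_indicator (fun c => x.toList.contains c) w.toList,
          ← sum_map_add' w.toList
            (fun c => ((t.countP (fun y => y.toList.contains c) : Nat) : Int))
            (fun c => if x.toList.contains c then (1 : Int) else 0)]
      apply congrArg List.sum
      apply List.map_congr_left
      intro c _
      rw [List.countP_cons]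
      by_cases hc : x.toList.contains c <;> simp [hc]
    rw [hsplit]
    rcases eq_or_ne x w with h | h
    · subst h
      rw [if_neg (by simp)]
      have hfull : (x.toList.filter (fun c => x.toList.contains c)).length = x.toList.length := by
        rw [List.filter_eq_self.2 (fun c hc => by simpa using hc)]
      have hcnt : (x :: t).count x = t.count x + 1 := by simp [List.count_cons]
      rw [hfull, hcnt]
      push_cast
      ring
    · have hif : (if x ≠ w then count_shared_letters w x else 0) = count_shared_letters w x :=
        if_pos h
      rw [hif, csl_eq_filter]
      have hcnt : (x :: t).count w = t.count w := by
        simp [List.count_cons, Ne.symm h] <;> exact h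
      rw [hcnt]
      push_cast
      ring
-- B's score equals A's connection count
theorem score_eq (w : String) (words_ls : List String) :
    pvScore (pvBuildCounts words_ls).1 (pvBuildCounts words_ls).2 w
      = count_possible_connections w words_ls := by
  unfold pvScore pvBuildCounts
  simp only [buildCounts_fst, buildCounts_snd, PySem.Dict.getD_empty, zero_add]
  rw [score_closed, PySem.Str.len]

-- the selection loop equals Python min with key
theorem min_loop (f : String → Int) (t : List String) (m : String) :
    (t.foldl
      (fun st curr => if f curr < st.2 then (curr, f curr) else st)
      (m, f m)).1
      = (PySem.List.min? (m :: t) f).getD "" := by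
  induction t generalizing m with
  | nil => simp [PySem.List.min?]
  | cons x u ih =>
    by_cases h : f x < f m
    · have hx : PySem.List.min? (m :: x :: u) f = PySem.List.min? (x :: u) f := by
        simp only [PySem.List.min?, List.foldl_cons]
        simp [h]
      simp only [List.foldl_cons]
      rw [if_pos h, hx]
      exact ih x
    · have hx : PySem.List.min? (m :: x :: u) f = PySem.List.min? (m :: u) f := by
        simp only [PySem.List.min?, List.foldl_cons]
        simp [h]
      simp only [List.foldl_cons]
      rw [if_neg h, hx]
      exact ih m

-- ===== VERDICT (by name: the statement is the Claim_ definition above) =====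
theorem get_word_lowest_connection_count_spec : Claim_equal_get_word_lowest_connection_count := by
  intro candidates words_ls _ hpre
  unfold Spec_get_word_lowest_connection_count
  match candidates with
  | [] => exact absurd rfl hpre
  | c0 :: t =>
    unfold get_word_lowest_connection_count get_word_lowest_connection_count_alt
    have hkey : pvScore (pvBuildCounts words_ls).1 (pvBuildCounts words_ls).2
        = fun w => count_possible_connections w words_ls := by
      funext w; exact score_eq w words_ls
    simp only [hkey]
    simp only [List.foldl_cons]
    rw [if_neg (lt_irrefl _)]
    exact min_loop (fun w => count_possible_connections w words_ls) t c0
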